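-- pv_equiv track=rewrite | github.com/abortobias-hub/MS-Excel-Deduplicator-App | project.py | cluster_from_pairs_list
-- ===== SOURCE A (Python) =====
-- def cluster_from_pairs_list(pairs):
--     parent = {}
--     def find(x):
--         parent.setdefault(x, x)
--         if parent[x] != x:
--             parent[x] = find(parent[x])
--         return parent[x]
--     def union(a,b):
--         ra, rb = find(a), find(b)
--         if ra != rb:
--             parent[rb] = ra
--     for i,j,_ in pairs:
--         union(i,j)
--     clusters = {}
--     for node in parent:
--         root = find(node)
--         clusters.setdefault(root, []).append(node)
--     clusters_list = list(clusters.values())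
--     clusters_list.sort(key=lambda x: -len(x))
--     return clusters_list
-- ===== SOURCE B (Python) =====
-- def cluster_from_pairs_list(pairs):
--     # quick-find: flat label map relabelled eagerly on each merge (no recursion, no parent forest)
--     comp = {}
--     for i, j, _ in pairs:
--         comp.setdefault(i, i)
--         comp.setdefault(j, j)
--         li, lj = comp[i], comp[j]
--         if li != lj:
--             comp = {n: (li if l == lj else l) for n, l in comp.items()}
--     groups = {}
--     for n, l in comp.items():
--         groups.setdefault(l, []).append(n)
--     return sorted(groups.values(), key=lambda g: -len(g))
-- ===== Notes on version B (the rewrite author's own statement) =====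
-- stated objective: alternative
-- what changed: Replaces the recursive path-compressing union-find forest by a flat quick-find label map that is eagerly relabelled on each merge (no recursion, no parent pointers), then groups nodes by label in one pass.
import Mathlib
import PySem

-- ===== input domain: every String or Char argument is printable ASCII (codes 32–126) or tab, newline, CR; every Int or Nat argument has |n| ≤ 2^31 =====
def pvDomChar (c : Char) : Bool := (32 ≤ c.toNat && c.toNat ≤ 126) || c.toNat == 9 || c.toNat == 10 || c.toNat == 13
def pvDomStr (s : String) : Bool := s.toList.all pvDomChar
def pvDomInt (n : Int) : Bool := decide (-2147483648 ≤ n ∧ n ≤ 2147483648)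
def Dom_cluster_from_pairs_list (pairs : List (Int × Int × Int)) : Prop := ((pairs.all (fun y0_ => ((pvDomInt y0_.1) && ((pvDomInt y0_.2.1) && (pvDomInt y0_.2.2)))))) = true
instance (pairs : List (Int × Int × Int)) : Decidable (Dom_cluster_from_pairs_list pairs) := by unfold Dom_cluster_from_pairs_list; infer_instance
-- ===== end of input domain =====

-- B replaces A's recursive path-compressing union-find forest by a flat quick-find label map
-- relabelled eagerly on each merge (objective: alternative, no speed claim).

-- ===== PORT A =====
-- find(x) with path compression; the Nat fuel only makes the recursion structural: the parent
-- map is always a forest, so the chain from any key is shorter than the fuel passed at each call site.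
def pvFindA (fuel : Nat) (parent : PySem.Dict Int Int) (x : Int) : PySem.Dict Int Int × Int :=
  let parent := parent.setdefault x x        -- parent.setdefault(x, x)
  match fuel with
  | 0 => (parent, x)                         -- unreachable on a forest (fuel guard only)
  | fuel + 1 =>
    let px := parent.getD x x
    if px ≠ x then                           -- if parent[x] != x:
      let res := pvFindA fuel parent px      --   parent[x] = find(parent[x])
      (res.1.insert x res.2, res.2)          -- return parent[x]
    else (parent, x)

def pvUnionA (parent : PySem.Dict Int Int) (a b : Int) : PySem.Dict Int Int :=
  let r1 := pvFindA (parent.size + 1) parent a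
  let r2 := pvFindA (r1.1.size + 1) r1.1 b
  if r1.2 ≠ r2.2 then r2.1.insert r2.2 r1.2 else r2.1

def cluster_from_pairs_list (pairs : List (Int × Int × Int)) : List (List Int) :=
  let parent := pairs.foldl (fun parent t => pvUnionA parent t.1 t.2.1) PySem.Dict.empty
  let s := parent.keys.foldl
    (fun (s : PySem.Dict Int Int × PySem.Dict Int (List Int)) node =>
      let r := pvFindA (s.1.size + 1) s.1 node
      (r.1, s.2.modify r.2 [] (· ++ [node])))      -- clusters.setdefault(root, []).append(node)
    (parent, PySem.Dict.empty)
  PySem.List.sorted s.2.values (fun g => -(g.length : Int)) false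

-- ===== PORT B =====
def pvStepB (comp : PySem.Dict Int Int) (i j : Int) : PySem.Dict Int Int :=
  let comp := comp.setdefault i i
  let comp := comp.setdefault j j
  let li := comp.getD i i
  let lj := comp.getD j j
  if li ≠ lj then
    PySem.Dict.mk (comp.items.map (fun p => (p.1, if p.2 == lj then li else p.2)))
  else comp

def cluster_from_pairs_list_alt (pairs : List (Int × Int × Int)) : List (List Int) :=
  let comp := pairs.foldl (fun comp t => pvStepB comp t.1 t.2.1) PySem.Dict.empty
  let groups := comp.items.foldl
    (fun (g : PySem.Dict Int (List Int)) p => g.modify p.2 [] (· ++ [p.1]))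
    PySem.Dict.empty
  PySem.List.sorted groups.values (fun g => -(g.length : Int)) false

-- ===== PRECONDITION & SPEC =====
def Spec_cluster_from_pairs_list (pairs : List (Int × Int × Int)) (out : List (List Int)) : Prop := out = cluster_from_pairs_list_alt pairs
instance (pairs : List (Int × Int × Int)) (out : List (List Int)) : Decidable (Spec_cluster_from_pairs_list pairs out) := by unfold Spec_cluster_from_pairs_list; infer_instance

-- ===== CLAIM (what is proved, stated in full; the proofs are below) =====
def Claim_equal_cluster_from_pairs_list : Prop := ∀ (pairs : List (Int × Int × Int)), Dom_cluster_from_pairs_list pairs → Spec_cluster_from_pairs_list pairs (cluster_from_pairs_list pairs)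

-- ===== LEMMAS AND PROOFS =====

-- parent/label lookup as Python's d.get(x, x)
def pvPf (d : PySem.Dict Int Int) (x : Int) : Int := d.getD x x

-- the coupling invariant: same keys (in order); parent links stay inside the comp-class;
-- every comp label is a parent-root; parent-roots are their own label; dp decreases along links
def pvInvP (d c : PySem.Dict Int Int) (dp : Int → Nat) : Prop :=
  d.keys = c.keys ∧ d.keys.Nodup ∧
  (∀ x ∈ d.keys, pvPf d x ∈ d.keys ∧ pvPf c (pvPf d x) = pvPf c x) ∧
  (∀ x ∈ d.keys, pvPf c x ∈ d.keys ∧ pvPf d (pvPf c x) = pvPf c x) ∧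
  (∀ x ∈ d.keys, pvPf d x = x → pvPf c x = x) ∧
  (∀ x ∈ d.keys, pvPf d x ≠ x → dp (pvPf d x) < dp x)

def pvInv (d c : PySem.Dict Int Int) : Prop := ∃ dp, pvInvP d c dp

def pvRelab (c : PySem.Dict Int Int) (lj li : Int) : PySem.Dict Int Int :=
  PySem.Dict.mk (c.items.map (fun p => (p.1, if p.2 == lj then li else p.2)))

lemma pv_countP_lt {α : Type} (p q : α → Bool) (l : List α) (hpq : ∀ x ∈ l, p x = true → q x = true)
    (a : α) (ha : a ∈ l) (hqa : q a = true) (hpa : ¬ p a = true) :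
    l.countP p < l.countP q := by
  induction l with
  | nil => cases ha
  | cons b t ih =>
    rcases List.mem_cons.mp ha with rfl | hat
    · have hle := List.countP_mono_left (l := t) (p := p) (q := q)
        (fun x hx => hpq x (List.mem_cons_of_mem _ hx))
      simp only [List.countP_cons, if_neg hpa, if_pos hqa]
      omega
    · have hb := hpq b (List.mem_cons_self)
      have hlt := ih (fun x hx => hpq x (List.mem_cons_of_mem _ hx)) hat
      simp only [List.countP_cons]
      by_cases hp : p b = true
      · simp only [if_pos hp, if_pos (hb hp)]; omega
      · simp only [if_neg hp]
        split_ifs <;> omega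

lemma pv_size_eq (d : PySem.Dict Int Int) : d.size = d.keys.length := by
  simp [PySem.Dict.size, PySem.Dict.keys]

lemma pv_getD_mem (d : PySem.Dict Int Int) (x : Int) (hx : x ∈ d.keys) (a b : Int) :
    d.getD x a = d.getD x b := by
  cases hs : d.get? x with
  | none => exact absurd hx ((PySem.Dict.get?_eq_none_iff_not_mem_keys d x).mp hs)
  | some v => simp [PySem.Dict.getD_eq_get?_getD, hs]

lemma pv_cf_idem {d c : PySem.Dict Int Int} {dp : Int → Nat} (h : pvInvP d c dp)
    {x : Int} (hx : x ∈ d.keys) : pvPf c (pvPf c x) = pvPf c x := by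
  obtain ⟨-, -, -, h4, h5, -⟩ := h
  obtain ⟨hm, hfix⟩ := h4 x hx
  exact h5 _ hm hfix

lemma pv_bound (d c : PySem.Dict Int Int) (dp : Int → Nat) (h : pvInvP d c dp) :
    ∃ dp', pvInvP d c dp' ∧ ∀ x ∈ d.keys, dp' x < d.keys.length := by
  obtain ⟨h1, h2, h3, h4, h5, h6⟩ := h
  refine ⟨fun y => d.keys.countP (fun z => decide (dp z < dp y)), ⟨h1, h2, h3, h4, h5, ?_⟩, ?_⟩
  · intro x hx hne
    have hlt := h6 x hx hne
    exact pv_countP_lt _ _ _ (fun z _ hz => by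
        simp only [decide_eq_true_eq] at *; omega)
      (pvPf d x) (h3 x hx).1 (by simpa using hlt) (by simp)
  · intro x hx
    have := pv_countP_lt (fun z => decide (dp z < dp x)) (fun _ => true) d.keys
      (fun z _ _ => rfl) x hx rfl (by simp)
    simpa [List.countP_true] using this

lemma pv_pf_setdefault (c : PySem.Dict Int Int) (i j : Int) :
    pvPf (c.setdefault j j) i = pvPf c i := by
  by_cases hc : c.contains j = true
  · rw [PySem.Dict.setdefault_of_contains _ _ hc]
  · rw [PySem.Dict.setdefault_of_not_contains _ _ (Bool.not_eq_true _ ▸ hc)]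
    by_cases hij : i = j
    · subst hij
      simp [pvPf, PySem.Dict.getD_insert_self,
        PySem.Dict.getD_of_not_contains _ _ (Bool.not_eq_true _ ▸ hc)]
    · simp [pvPf, PySem.Dict.getD_insert, hij]

lemma pv_setdefault_keys (d : PySem.Dict Int Int) (x : Int) :
    (d.setdefault x x).keys = if x ∈ d.keys then d.keys else d.keys ++ [x] := by
  by_cases hc : x ∈ d.keys
  · rw [PySem.Dict.setdefault_of_contains _ _ ((PySem.Dict.contains_iff_mem_keys d x).mpr hc),
      if_pos hc]
  · have hcf : d.contains x = false := by
      rw [← Bool.not_eq_true]; exact fun h => hc ((PySem.Dict.contains_iff_mem_keys d x).mp h)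
    rw [PySem.Dict.setdefault_of_not_contains _ _ hcf,
      PySem.Dict.keys_insert_of_not_contains _ _ hcf, if_neg hc]

lemma pv_setdefault_inv (d c : PySem.Dict Int Int) (dp : Int → Nat) (x : Int) (h : pvInvP d c dp) :
    pvInvP (d.setdefault x x) (c.setdefault x x)
      (fun y => if x ∈ d.keys then dp y else if y = x then 0 else dp y) := by
  obtain ⟨h1, h2, h3, h4, h5, h6⟩ := h
  by_cases hc : x ∈ d.keys
  · have hcd := (PySem.Dict.contains_iff_mem_keys d x).mpr hc
    have hcc := (PySem.Dict.contains_iff_mem_keys c x).mpr (h1 ▸ hc)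
    rw [PySem.Dict.setdefault_of_contains _ _ hcd, PySem.Dict.setdefault_of_contains _ _ hcc]
    simp only [if_pos hc]
    exact ⟨h1, h2, h3, h4, h5, h6⟩
  · have hcd : d.contains x = false := by
      rw [← Bool.not_eq_true]; exact fun hh => hc ((PySem.Dict.contains_iff_mem_keys d x).mp hh)
    have hcc : c.contains x = false := by
      rw [← Bool.not_eq_true]
      exact fun hh => hc (h1 ▸ (PySem.Dict.contains_iff_mem_keys c x).mp hh)
    rw [PySem.Dict.setdefault_of_not_contains _ _ hcd, PySem.Dict.setdefault_of_not_contains _ _ hcc]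
    have hkd := PySem.Dict.keys_insert_of_not_contains _ (x) hcd
    have hkc := PySem.Dict.keys_insert_of_not_contains _ (x) hcc
    have hpd : ∀ y, pvPf (d.insert x x) y = if y = x then x else pvPf d y := fun y => by
      simp [pvPf, PySem.Dict.getD_insert]
    have hpc : ∀ y, pvPf (c.insert x x) y = if y = x then x else pvPf c y := fun y => by
      simp [pvPf, PySem.Dict.getD_insert]
    have hmem : ∀ y, y ∈ (d.insert x x).keys ↔ y = x ∨ y ∈ d.keys := fun y => by
      rw [hkd]; simp [or_comm]
    simp only [if_neg hc]
    refine ⟨by rw [hkd, hkc, h1], ?_, ?_, ?_, ?_, ?_⟩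
    · rw [hkd]
      exact List.nodup_append.mpr ⟨h2, List.nodup_singleton x,
        fun a ha b hb => by simp at hb; subst hb; exact fun e => hc (e ▸ ha)⟩
    · intro y hy
      rcases (hmem y).mp hy with rfl | hyo
      · rw [hpd y, if_pos rfl]
        exact ⟨hy, rfl⟩
      · have hyx : y ≠ x := fun e => hc (e ▸ hyo)
        obtain ⟨hm, heq⟩ := h3 y hyo
        have hmx : pvPf d y ≠ x := fun e => hc (e ▸ hm)
        rw [hpd y, if_neg hyx]
        exact ⟨(hmem _).mpr (Or.inr hm), by rw [hpc _, if_neg hmx, hpc y, if_neg hyx, heq]⟩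
    · intro y hy
      rcases (hmem y).mp hy with rfl | hyo
      · rw [hpc y, if_pos rfl]
        exact ⟨hy, by rw [hpd y, if_pos rfl]⟩
      · have hyx : y ≠ x := fun e => hc (e ▸ hyo)
        obtain ⟨hm, heq⟩ := h4 y hyo
        have hmx : pvPf c y ≠ x := fun e => hc (e ▸ hm)
        rw [hpc y, if_neg hyx]
        exact ⟨(hmem _).mpr (Or.inr hm), by rw [hpd _, if_neg hmx, heq]⟩
    · intro y hy
      rcases (hmem y).mp hy with rfl | hyo
      · intro _; rw [hpc y, if_pos rfl]
      · have hyx : y ≠ x := fun e => hc (e ▸ hyo)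
        rw [hpd y, if_neg hyx, hpc y, if_neg hyx]
        exact h5 y hyo
    · intro y hy
      rcases (hmem y).mp hy with rfl | hyo
      · rw [hpd y, if_pos rfl]
        exact fun hne => absurd rfl hne
      · have hyx : y ≠ x := fun e => hc (e ▸ hyo)
        rw [hpd y, if_neg hyx]
        intro hne
        have hm := (h3 y hyo).1
        have hmx : pvPf d y ≠ x := fun e => hc (e ▸ hm)
        simp only [if_neg hmx, if_neg hyx]
        exact h6 y hyo hne

lemma pv_relab_get? (l : List (Int × Int)) (lj li y : Int) :
    (PySem.Dict.mk (l.map (fun p => (p.1, if p.2 == lj then li else p.2)))).get? y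
      = ((PySem.Dict.mk l).get? y).map (fun v => if v == lj then li else v) := by
  induction l with
  | nil => simp [PySem.Dict.get?]
  | cons p rest ih =>
    obtain ⟨k, v⟩ := p
    simp only [List.map_cons, PySem.Dict.get?_mk_cons]
    by_cases hk : (k == y) = true
    · simp [hk]
    · simp only [if_neg hk]
      exact ih

lemma pv_relab_keys (c : PySem.Dict Int Int) (lj li : Int) :
    (pvRelab c lj li).keys = c.keys := by
  simp [pvRelab, PySem.Dict.keys, List.map_map, Function.comp]

lemma pv_pf_relab (c : PySem.Dict Int Int) (lj li y : Int) (hy : y ∈ c.keys) :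
    pvPf (pvRelab c lj li) y = if pvPf c y = lj then li else pvPf c y := by
  cases hs : c.get? y with
  | none => exact absurd hy ((PySem.Dict.get?_eq_none_iff_not_mem_keys c y).mp hs)
  | some v =>
    have hrel : (pvRelab c lj li).get? y = some (if v == lj then li else v) := by
      have h := pv_relab_get? c.items lj li y
      simpa [pvRelab, hs] using h
    simp [pvPf, PySem.Dict.getD_eq_get?_getD, hs, hrel, beq_iff_eq]

lemma pv_find_setdefault (fuel : Nat) (d : PySem.Dict Int Int) (x : Int) :
    pvFindA fuel d x = pvFindA fuel (d.setdefault x x) x := by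
  by_cases hc : d.contains x = true
  · rw [PySem.Dict.setdefault_of_contains _ _ hc]
  · have h2 : (d.setdefault x x).setdefault x x = d.setdefault x x := by
      apply PySem.Dict.setdefault_of_contains
      rw [PySem.Dict.setdefault_of_not_contains _ _ (Bool.not_eq_true _ ▸ hc)]
      exact PySem.Dict.contains_insert_self d x x
    cases fuel <;> simp only [pvFindA, h2]

lemma pv_find_go (fuel : Nat) : ∀ (d c : PySem.Dict Int Int) (dp : Int → Nat) (x : Int),
    pvInvP d c dp → x ∈ d.keys → dp x < fuel →
    (pvFindA fuel d x).2 = pvPf c x ∧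
    ((pvFindA fuel d x).1).keys = d.keys ∧
    pvInvP (pvFindA fuel d x).1 c dp ∧
    dp (pvFindA fuel d x).2 ≤ dp x := by
  induction fuel with
  | zero => exact fun d c dp x _ _ hf => absurd hf (Nat.not_lt_zero _)
  | succ fuel ih =>
    intro d c dp x h hx hf
    obtain ⟨h1, h2, h3, h4, h5, h6⟩ := h
    have hsd : d.setdefault x x = d :=
      PySem.Dict.setdefault_of_contains _ _ ((PySem.Dict.contains_iff_mem_keys d x).mpr hx)
    by_cases hpx : d.getD x x = x
    · have hres : pvFindA (fuel + 1) d x = (d, x) := by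
        simp only [pvFindA, hsd]
        simp [hpx]
      rw [hres]
      exact ⟨(h5 x hx hpx).symm, rfl, ⟨h1, h2, h3, h4, h5, h6⟩, le_refl _⟩
    · have hpxm : d.getD x x ∈ d.keys := (h3 x hx).1
      have hdp : dp (d.getD x x) < dp x := h6 x hx hpx
      obtain ⟨i1, i2, i3, i4⟩ :=
        ih d c dp (d.getD x x) ⟨h1, h2, h3, h4, h5, h6⟩ hpxm (by omega)
      have hrun : pvFindA (fuel + 1) d x
          = ((pvFindA fuel d (d.getD x x)).1.insert x (pvFindA fuel d (d.getD x x)).2,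
             (pvFindA fuel d (d.getD x x)).2) := by
        simp only [pvFindA, hsd]
        simp [hpx]
      set res := pvFindA fuel d (d.getD x x) with hresdef
      have hr : res.2 = pvPf c x := i1.trans (h3 x hx).2
      have hrm : res.2 ∈ d.keys := hr ▸ (h4 x hx).1
      have hrx : res.2 ≠ x := by
        intro e
        have : pvPf c x = x := by rw [← hr, e]
        exact hpx (this ▸ (h4 x hx).2)
      have hxr : x ∈ res.1.keys := i2 ▸ hx
      have hkeq : (res.1.insert x res.2).keys = d.keys := by
        rw [PySem.Dict.keys_insert_of_contains _ res.2
          ((PySem.Dict.contains_iff_mem_keys _ _).mpr hxr)]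
        exact i2
      obtain ⟨j1, j2, j3, j4, j5, j6⟩ := i3
      have hp2 : ∀ y, pvPf (res.1.insert x res.2) y = if y = x then res.2 else pvPf res.1 y :=
        fun y => by simp [pvPf, PySem.Dict.getD_insert]
      rw [hrun]
      refine ⟨hr, hkeq, ⟨hkeq.trans h1, hkeq.symm ▸ h2, ?_, ?_, ?_, ?_⟩, by
        simp only []
        omega⟩
      · intro y hy
        rw [hkeq] at hy
        by_cases hyx : y = x
        · subst hyx
          rw [hp2 y, if_pos rfl]
          exact ⟨hkeq.symm ▸ hrm, by rw [hr]; exact pv_cf_idem ⟨h1, h2, h3, h4, h5, h6⟩ hy⟩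
        · rw [hp2 y, if_neg hyx]
          obtain ⟨jm, je⟩ := j3 y (i2.symm ▸ hy)
          exact ⟨hkeq.symm ▸ (i2 ▸ jm), je⟩
      · intro y hy
        rw [hkeq] at hy
        have hcx : pvPf c y ≠ x := by
          intro e
          exact hpx (e ▸ (h4 y hy).2)
        obtain ⟨jm, je⟩ := j4 y (i2.symm ▸ hy)
        rw [hp2 _, if_neg hcx]
        exact ⟨hkeq.symm ▸ (i2 ▸ jm), je⟩
      · intro y hy
        rw [hkeq] at hy
        by_cases hyx : y = x
        · subst hyx
          rw [hp2 y, if_pos rfl]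
          exact fun e => absurd e hrx
        · rw [hp2 y, if_neg hyx]
          exact j5 y (i2.symm ▸ hy)
      · intro y hy
        rw [hkeq] at hy
        by_cases hyx : y = x
        · subst hyx
          rw [hp2 y, if_pos rfl]
          intro _
          omega
        · rw [hp2 y, if_neg hyx]
          exact j6 y (i2.symm ▸ hy)

lemma pv_link (d c : PySem.Dict Int Int) (dp : Int → Nat) (h : pvInvP d c dp) (i j : Int)
    (hi : i ∈ d.keys) (hj : j ∈ d.keys) (hne : pvPf c i ≠ pvPf c j) :
    pvInvP (d.insert (pvPf c j) (pvPf c i)) (pvRelab c (pvPf c j) (pvPf c i))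
      (fun y => if pvPf c y = pvPf c j then dp y + dp (pvPf c i) + 1 else dp y) := by
  obtain ⟨h1, h2, h3, h4, h5, h6⟩ := h
  set ra := pvPf c i with hraD
  set rb := pvPf c j with hrbD
  have hram : ra ∈ d.keys := (h4 i hi).1
  have hrbm : rb ∈ d.keys := (h4 j hj).1
  have hdra : pvPf d ra = ra := (h4 i hi).2
  have hcra : pvPf c ra = ra := pv_cf_idem ⟨h1, h2, h3, h4, h5, h6⟩ hi
  have hcrb : pvPf c rb = rb := pv_cf_idem ⟨h1, h2, h3, h4, h5, h6⟩ hj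
  have hkd : (d.insert rb ra).keys = d.keys :=
    PySem.Dict.keys_insert_of_contains _ ra ((PySem.Dict.contains_iff_mem_keys _ _).mpr hrbm)
  have hkc : (pvRelab c rb ra).keys = c.keys := pv_relab_keys c rb ra
  have hpd : ∀ y, pvPf (d.insert rb ra) y = if y = rb then ra else pvPf d y :=
    fun y => by simp [pvPf, PySem.Dict.getD_insert]
  have hpc : ∀ y, y ∈ d.keys → pvPf (pvRelab c rb ra) y = if pvPf c y = rb then ra else pvPf c y :=
    fun y hy => pv_pf_relab c rb ra y (h1 ▸ hy)
  refine ⟨hkd.trans (h1.trans hkc.symm), hkd.symm ▸ h2, ?_, ?_, ?_, ?_⟩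
  · intro y hy
    rw [hkd] at hy
    by_cases hyb : y = rb
    · rw [hyb] at hy ⊢
      rw [hpd rb, if_pos rfl]
      refine ⟨hkd.symm ▸ hram, ?_⟩
      rw [hpc ra hram, hpc rb hy, hcra, hcrb, if_neg hne, if_pos rfl]
    · rw [hpd y, if_neg hyb]
      obtain ⟨hm, he⟩ := h3 y hy
      refine ⟨hkd.symm ▸ hm, ?_⟩
      rw [hpc _ hm, hpc y hy, he]
  · intro y hy
    rw [hkd] at hy
    rw [hpc y hy]
    by_cases hyb : pvPf c y = rb
    · rw [if_pos hyb]
      refine ⟨hkd.symm ▸ hram, ?_⟩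
      rw [hpd ra, if_neg (fun e => hne (hraD ▸ e)), hdra]
    · rw [if_neg hyb]
      obtain ⟨hm, he⟩ := h4 y hy
      refine ⟨hkd.symm ▸ hm, ?_⟩
      rw [hpd _, if_neg hyb, he]
  · intro y hy
    rw [hkd] at hy
    by_cases hyb : y = rb
    · rw [hyb] at hy ⊢
      rw [hpd rb, if_pos rfl]
      exact fun e => absurd e hne
    · rw [hpd y, if_neg hyb, hpc y hy]
      intro he
      rw [h5 y hy he, if_neg hyb]
  · intro y hy
    rw [hkd] at hy
    by_cases hyb : y = rb
    · rw [hyb] at hy ⊢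
      rw [hpd rb, if_pos rfl]
      intro _
      simp only [hcra, hcrb, if_neg hne, if_true]
      omega
    · rw [hpd y, if_neg hyb]
      intro he
      have hlt := h6 y hy he
      have hcls := (h3 y hy).2
      simp only [hcls]
      by_cases hcy : pvPf c y = rb
      · simp only [if_pos hcy]; omega
      · simp only [if_neg hcy]; omega

lemma pv_mem_setdefault_self (d : PySem.Dict Int Int) (x : Int) :
    x ∈ (d.setdefault x x).keys := by
  rw [pv_setdefault_keys]
  split_ifs with h
  · exact h
  · simp

lemma pv_mem_setdefault_of_mem (d : PySem.Dict Int Int) {y : Int} (x : Int) (hy : y ∈ d.keys) :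
    y ∈ (d.setdefault x x).keys := by
  rw [pv_setdefault_keys]
  split_ifs with h
  · exact hy
  · exact List.mem_append_left _ hy

lemma pv_union_step (d c : PySem.Dict Int Int) (i j : Int) (h : pvInv d c) :
    pvInv (pvUnionA d i j) (pvStepB c i j) := by
  obtain ⟨dp0, h0⟩ := h
  obtain ⟨dp, hI, hb⟩ := pv_bound d c dp0 h0
  have hI1 := pv_setdefault_inv d c dp i hI
  have hmem_i : i ∈ (d.setdefault i i).keys := pv_mem_setdefault_self d i
  have hb1 : ∀ y ∈ (d.setdefault i i).keys,
      (fun y => if i ∈ d.keys then dp y else if y = i then 0 else dp y) y < d.keys.length + 1 := by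
    intro y hy
    rw [pv_setdefault_keys] at hy
    by_cases hc : i ∈ d.keys
    · rw [if_pos hc] at hy
      simp only [if_pos hc]
      exact Nat.lt_succ_of_lt (hb y hy)
    · rw [if_neg hc] at hy
      simp only [if_neg hc]
      rcases List.mem_append.mp hy with hy | hy
      · rw [if_neg (fun (e : y = i) => hc (e ▸ hy))]
        exact Nat.lt_succ_of_lt (hb y hy)
      · simp at hy
        rw [if_pos hy]
        omega
  have hfd1 := pv_find_setdefault (d.size + 1) d i
  obtain ⟨f1, f2, f3, f4⟩ := pv_find_go (d.size + 1) (d.setdefault i i) (c.setdefault i i)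
    _ i hI1 hmem_i (by rw [pv_size_eq]; exact hb1 i hmem_i)
  rw [← hfd1] at f1 f2 f3 f4
  set r1 := pvFindA (d.size + 1) d i with hr1
  -- second find
  have hI2 := pv_setdefault_inv r1.1 (c.setdefault i i) _ j f3
  have hmem_j : j ∈ (r1.1.setdefault j j).keys := pv_mem_setdefault_self r1.1 j
  have hlen1 : d.keys.length ≤ r1.1.keys.length := by
    rw [f2, pv_setdefault_keys]
    split_ifs
    · exact le_refl _
    · simp
  have hb2 : ∀ y ∈ (r1.1.setdefault j j).keys,
      (fun y => if j ∈ r1.1.keys then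
          (if i ∈ d.keys then dp y else if y = i then 0 else dp y)
        else if y = j then 0 else
          (if i ∈ d.keys then dp y else if y = i then 0 else dp y)) y < r1.1.keys.length + 1 := by
    intro y hy
    rw [pv_setdefault_keys] at hy
    by_cases hc : j ∈ r1.1.keys
    · rw [if_pos hc] at hy
      simp only [if_pos hc]
      have hby := hb1 y (f2 ▸ hy)
      simp only [] at hby
      omega
    · rw [if_neg hc] at hy
      simp only [if_neg hc]
      rcases List.mem_append.mp hy with hy | hy
      · rw [if_neg (fun (e : y = j) => hc (e ▸ hy))]
        have hby := hb1 y (f2 ▸ hy)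
        simp only [] at hby
        omega
      · simp at hy
        rw [if_pos hy]
        omega
  have hfd2 := pv_find_setdefault (r1.1.size + 1) r1.1 j
  obtain ⟨g1, g2, g3, g4⟩ := pv_find_go (r1.1.size + 1) (r1.1.setdefault j j)
    ((c.setdefault i i).setdefault j j) _ j hI2 hmem_j
    (by rw [pv_size_eq]; exact hb2 j hmem_j)
  rw [← hfd2] at g1 g2 g3 g4
  set r2 := pvFindA (r1.1.size + 1) r1.1 j with hr2
  set c2 := (c.setdefault i i).setdefault j j with hc2
  -- memberships for the link step
  have hi2 : i ∈ r2.1.keys := by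
    rw [g2]
    exact pv_mem_setdefault_of_mem r1.1 j (f2 ▸ pv_mem_setdefault_self d i)
  have hj2 : j ∈ r2.1.keys := g2 ▸ hmem_j
  -- identify the two conditions
  have hli : pvPf c2 i = pvPf (c.setdefault i i) i := pv_pf_setdefault (c.setdefault i i) i j
  have hU : pvUnionA d i j = if r1.2 ≠ r2.2 then r2.1.insert r2.2 r1.2 else r2.1 := rfl
  have hB : pvStepB c i j
      = if pvPf c2 i ≠ pvPf c2 j then pvRelab c2 (pvPf c2 j) (pvPf c2 i) else c2 := rfl
  rw [hU, hB, f1, g1, ← hli]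
  by_cases hne : pvPf c2 i ≠ pvPf c2 j
  · rw [if_pos hne, if_pos hne]
    exact ⟨_, pv_link r2.1 c2 _ g3 i j hi2 hj2 hne⟩
  · rw [if_neg hne, if_neg hne]
    exact ⟨_, g3⟩

lemma pv_fold_inv (ps : List (Int × Int × Int)) : ∀ (d c : PySem.Dict Int Int), pvInv d c →
    pvInv (ps.foldl (fun d t => pvUnionA d t.1 t.2.1) d) (ps.foldl (fun c t => pvStepB c t.1 t.2.1) c) := by
  induction ps with
  | nil => exact fun d c h => h
  | cons t ts ih =>
    intro d c h
    simp only [List.foldl_cons]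
    exact ih _ _ (pv_union_step d c t.1 t.2.1 h)

lemma pv_group (ks : List Int) : ∀ (d c : PySem.Dict Int Int) (dp : Int → Nat) (g : PySem.Dict Int (List Int)),
    pvInvP d c dp → (∀ y ∈ d.keys, dp y < d.keys.length) → (∀ y ∈ ks, y ∈ d.keys) →
    (ks.foldl (fun (s : PySem.Dict Int Int × PySem.Dict Int (List Int)) node =>
        ((pvFindA (s.1.size + 1) s.1 node).1,
         s.2.modify (pvFindA (s.1.size + 1) s.1 node).2 [] (· ++ [node]))) (d, g)).2
      = ks.foldl (fun g y => g.modify (pvPf c y) [] (· ++ [y])) g := by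
  induction ks with
  | nil => exact fun d c dp g _ _ _ => rfl
  | cons y ys ih =>
    intro d c dp g h hbd hks
    have hy : y ∈ d.keys := hks y (by simp)
    have hfuel : dp y < d.size + 1 := by
      rw [pv_size_eq]
      exact Nat.lt_succ_of_lt (hbd y hy)
    obtain ⟨f1, f2, f3, f4⟩ := pv_find_go (d.size + 1) d c dp y h hy hfuel
    simp only [List.foldl_cons]
    rw [f1]
    exact ih (pvFindA (d.size + 1) d y).1 c dp _ f3
      (by rw [f2]; exact hbd)
      (fun z hz => f2 ▸ hks z (List.mem_cons_of_mem _ hz))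

-- ===== VERDICT (by name: the statement is the Claim_ definition above) =====
set_option maxHeartbeats 1000000 in
theorem cluster_from_pairs_list_spec : Claim_equal_cluster_from_pairs_list := by
  intro pairs _
  unfold Spec_cluster_from_pairs_list
  have h0 : pvInv (PySem.Dict.empty : PySem.Dict Int Int) PySem.Dict.empty :=
    ⟨fun _ => 0, by
      refine ⟨rfl, ?_, ?_, ?_, ?_, ?_⟩ <;> simp [PySem.Dict.keys, PySem.Dict.empty]⟩
  obtain ⟨dpr, hIr⟩ := pv_fold_inv pairs _ _ h0
  obtain ⟨dp, hI, hb⟩ := pv_bound _ _ _ hIr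
  set D := pairs.foldl (fun parent t => pvUnionA parent t.1 t.2.1) PySem.Dict.empty with hD
  set C := pairs.foldl (fun comp t => pvStepB comp t.1 t.2.1) PySem.Dict.empty with hC
  have hgroup := pv_group D.keys D C dp PySem.Dict.empty hI hb (fun y hy => hy)
  have hnd : C.keys.Nodup := hI.1 ▸ hI.2.1
  simp only [cluster_from_pairs_list, cluster_from_pairs_list_alt, ← hD, ← hC]
  rw [hgroup, PySem.Dict.items_eq_map_keys _ hnd (0 : Int), List.foldl_map, ← hI.1]
  congr 1
  refine congrArg PySem.Dict.values ?_
  apply PySem.List.foldl_congr_mem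
  intro acc y hy
  have hgd := pv_getD_mem C y (hI.1 ▸ hy) y 0
  simp [pvPf, hgd]
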